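-- pv_equiv track=rewrite | github.com/spyeic/cs-study | CS61A/week2/hw3.py | missing_digits
-- ===== SOURCE A (Python) =====
-- def missing_digits(n):
--     """Given a number a that is in sorted, increasing order,
--     return the number of missing digits in n. A missing digit is
--     a number between the first and last digit of a that is not in n.
--     >>> missing_digits(1248) # 3, 5, 6, 7
--     4
--     >>> missing_digits(1122) # No missing numbers
--     0
--     >>> missing_digits(123456) # No missing numbers
--     0
--     >>> missing_digits(3558) # 4, 6, 7
--     3
--     >>> missing_digits(35578) # 4, 6
--     2
--     >>> missing_digits(12456) # 3
--     1
--     >>> missing_digits(16789) # 2, 3, 4, 5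
--     4
--     >>> missing_digits(19) # 2, 3, 4, 5, 6, 7, 8
--     7
--     >>> missing_digits(4) # No missing numbers between 4 and 4
--     0
--     """
--     "*** YOUR CODE HERE ***"
--     """
--     def f(nu, s):
--         before, last = nu // 10, nu % 10
--         if nu <= 0:
--             return 0
--         elif last > s:
--             return f(before, s)
--         elif last < s:
--             return f(nu, s - 1) + 1
--         else:
--             return f(before, s - 1)
--
--     return f(n, n % 10)
--     """
--     before, last = n // 10, n % 10
--     if before == 0:
--         return 0
--     before_s_last = before % 10
--     dif = last - before_s_last - 1
--     if dif < 0: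
--         dif = 0
--     return missing_digits(before) + dif
-- ===== SOURCE B (Python) =====
-- def missing_digits(n):
--     s = str(n)
--     return sum(max(0, ord(b) - ord(a) - 1) for a, b in zip(s, s[1:]))
-- ===== Notes on version B (the rewrite author's own statement) =====
-- stated objective: simpler
-- what changed: Replaces A's arithmetic recursion on n//10 with a flat single pass over the decimal string, summing max(0, ord(b)-ord(a)-1) over consecutive character pairs.
import Mathlib
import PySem

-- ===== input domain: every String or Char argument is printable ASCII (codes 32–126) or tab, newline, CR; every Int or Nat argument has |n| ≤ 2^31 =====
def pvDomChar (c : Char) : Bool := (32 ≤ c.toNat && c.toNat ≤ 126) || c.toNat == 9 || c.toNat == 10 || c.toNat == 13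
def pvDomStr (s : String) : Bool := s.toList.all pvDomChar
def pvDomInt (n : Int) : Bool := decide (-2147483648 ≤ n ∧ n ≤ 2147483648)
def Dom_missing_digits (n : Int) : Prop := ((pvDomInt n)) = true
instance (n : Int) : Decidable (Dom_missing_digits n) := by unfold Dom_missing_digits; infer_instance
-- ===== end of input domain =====

-- B replaces A's arithmetic recursion on n//10 with a single pass over str(n)'s
-- consecutive character pairs summing max(0, ord(b)-ord(a)-1); same values on all n ≥ 0.


-- ===== PORT A =====
-- Python A recurses on n // 10; the fuel argument only makes the recursion total in
-- Lean (for n ≥ 0 it never runs out, see mdGo_fuel below); on n < 0 Python A diverges.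
def mdGo : Nat → Int → Int
  | 0, _ => 0
  | fuel + 1, n =>
    let before := PySem.Int.floordiv n 10
    let last := PySem.Int.mod n 10
    if before = 0 then 0
    else
      let before_s_last := PySem.Int.mod before 10
      let dif := last - before_s_last - 1
      let dif' := if dif < 0 then 0 else dif
      mdGo fuel before + dif'

def missing_digits (n : Int) : Int := mdGo (n.toNat + 1) n

-- ===== PORT B =====
def missing_digits_alt (n : Int) : Int :=
  let s := PySem.Int.toChars n
  ((s.zip s.tail).map (fun p => max 0 ((p.2.toNat : Int) - (p.1.toNat : Int) - 1))).sum

-- ===== PRECONDITION & SPEC =====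
-- Pre_ excludes n < 0, on which Python A recurses forever ((-1)//10 == -1) and raises RecursionError.
def Pre_missing_digits (n : Int) : Prop := 0 ≤ n
instance (n : Int) : Decidable (Pre_missing_digits n) := by unfold Pre_missing_digits; infer_instance
def pvWitness_missing_digits : Int := (1248)

def Spec_missing_digits (n : Int) (out : Int) : Prop := out = missing_digits_alt n
instance (n : Int) (out : Int) : Decidable (Spec_missing_digits n out) := by unfold Spec_missing_digits; infer_instance

-- ===== CLAIM (what is proved, stated in full; the proofs are below) =====
def Claim_equal_missing_digits : Prop := ∀ (n : Int), Dom_missing_digits n → Pre_missing_digits n → Spec_missing_digits n (missing_digits n)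

-- ===== LEMMAS AND PROOFS =====

-- the summand of B's pass and the pair-sum of a character list
def pvF (p : Char × Char) : Int := max 0 ((p.2.toNat : Int) - (p.1.toNat : Int) - 1)
def gsum (s : List Char) : Int := ((s.zip s.tail).map pvF).sum

lemma alt_eq_gsum (n : Int) : missing_digits_alt n = gsum (PySem.Int.toChars n) := rfl

lemma tdc_acc (b : Nat) : ∀ (f n : Nat) (ds : List Char),
    Nat.toDigitsCore b f n ds = Nat.toDigitsCore b f n [] ++ ds := by
  intro f
  induction f with
  | zero => intro n ds; simp [Nat.toDigitsCore]
  | succ f ih =>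
    intro n ds
    simp only [Nat.toDigitsCore]
    by_cases h : n / b = 0
    · simp [h]
    · simp only [h, if_false]
      rw [ih (n / b) ((n % b).digitChar :: ds), ih (n / b) [(n % b).digitChar]]
      simp

lemma tdc_fuel (b : Nat) (hb : 2 ≤ b) : ∀ (f g n : Nat) (ds : List Char),
    n < f → n < g → Nat.toDigitsCore b f n ds = Nat.toDigitsCore b g n ds := by
  intro f
  induction f with
  | zero => intro g n ds h; omega
  | succ f ih =>
    intro g n ds hf hg
    cases g with
    | zero => omega
    | succ g =>
      simp only [Nat.toDigitsCore]
      by_cases h : n / b = 0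
      · simp [h]
      · simp only [h, if_false]
        have hn : 0 < n := by
          rcases Nat.eq_zero_or_pos n with rfl | h'
          · simp at h
          · exact h'
        have hdiv : n / b < n := Nat.div_lt_self hn (by omega)
        exact ih g (n / b) _ (by omega) (by omega)

lemma tdc_succ (b f n : Nat) (ds : List Char) :
    Nat.toDigitsCore b (f + 1) n ds =
      if n / b = 0 then (n % b).digitChar :: ds
      else Nat.toDigitsCore b f (n / b) ((n % b).digitChar :: ds) := rfl

lemma toDigits_single (m : Nat) (h : m < 10) : Nat.toDigits 10 m = [Nat.digitChar m] := by
  have h0 : m / 10 = 0 := Nat.div_eq_of_lt h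
  have h1 : m % 10 = m := Nat.mod_eq_of_lt h
  have he : Nat.toDigits 10 m = Nat.toDigitsCore 10 (m + 1) m [] := rfl
  rw [he, tdc_succ, if_pos h0, h1]

lemma toDigits_split (m : Nat) (h : 10 ≤ m) :
    Nat.toDigits 10 m = Nat.toDigits 10 (m / 10) ++ [Nat.digitChar (m % 10)] := by
  have h0 : m / 10 ≠ 0 := by
    have : 1 ≤ m / 10 := (Nat.one_le_div_iff (by omega)).mpr h
    omega
  have hdiv : m / 10 < m := Nat.div_lt_self (by omega) (by omega)
  have he : Nat.toDigits 10 m = Nat.toDigitsCore 10 (m + 1) m [] := rfl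
  rw [he, tdc_succ, if_neg h0, tdc_acc,
    tdc_fuel 10 (by omega) m (m / 10 + 1) (m / 10) _ (by omega) (by omega)]
  rfl

lemma toDigits_ne_nil (m : Nat) : Nat.toDigits 10 m ≠ [] := by
  by_cases h : m < 10
  · simp [toDigits_single m h]
  · simp [toDigits_split m (by omega)]

lemma lastd_toDigits (m : Nat) (x : Char) :
    (Nat.toDigits 10 m).getLastD x = Nat.digitChar (m % 10) := by
  by_cases h : m < 10
  · rw [toDigits_single m h, Nat.mod_eq_of_lt h]; rfl
  · rw [toDigits_split m (by omega)]
    simp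

lemma zip_cons_self (xs : List Char) : ∀ (a c : Char),
    List.zip (a :: (xs ++ [c])) (xs ++ [c]) = List.zip (a :: xs) xs ++ [(xs.getLastD a, c)] := by
  induction xs with
  | nil => intro a c; rfl
  | cons b t ih =>
    intro a c
    simp only [List.cons_append, List.zip_cons_cons, ih b c, List.getLastD_cons]

lemma gsum_snoc (a : Char) (t : List Char) (c : Char) :
    gsum ((a :: t) ++ [c]) = gsum (a :: t) + pvF (t.getLastD a, c) := by
  simp only [gsum, List.cons_append, List.tail_cons, zip_cons_self t a c, List.map_append,
    List.sum_append, List.map_cons, List.map_nil, List.sum_cons, List.sum_nil, add_zero]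

lemma digitChar_toNat (d : Nat) (h : d < 10) : (Nat.digitChar d).toNat = d + 48 := by
  interval_cases d <;> decide

lemma floordiv_cast (m : Nat) : PySem.Int.floordiv (m : Int) 10 = ((m / 10 : Nat) : Int) := by
  exact_mod_cast PySem.Int.floordiv_natCast m 10

lemma mod_cast' (m : Nat) : PySem.Int.mod (m : Int) 10 = ((m % 10 : Nat) : Int) := by
  exact_mod_cast PySem.Int.mod_natCast m 10

lemma mdGo_succ (f : Nat) (n : Int) :
    mdGo (f + 1) n =
      if PySem.Int.floordiv n 10 = 0 then 0
      else mdGo f (PySem.Int.floordiv n 10) +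
        (if PySem.Int.mod n 10 - PySem.Int.mod (PySem.Int.floordiv n 10) 10 - 1 < 0 then 0
         else PySem.Int.mod n 10 - PySem.Int.mod (PySem.Int.floordiv n 10) 10 - 1) := rfl

lemma mdGo_fuel : ∀ (f g m : Nat), m < f → m < g → mdGo f (m : Int) = mdGo g (m : Int) := by
  intro f
  induction f with
  | zero => intro g m h; omega
  | succ f ih =>
    intro g m hf hg
    cases g with
    | zero => omega
    | succ g =>
      rw [mdGo_succ, mdGo_succ, floordiv_cast]
      by_cases h : m / 10 = 0
      · simp [h]
      · have h' : ((m / 10 : Nat) : Int) ≠ 0 := by exact_mod_cast h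
        rw [if_neg h', if_neg h']
        have hm : 0 < m := by
          rcases Nat.eq_zero_or_pos m with rfl | h''
          · simp at h
          · exact h''
        have hdiv : m / 10 < m := Nat.div_lt_self hm (by omega)
        rw [ih g (m / 10) (by omega) (by omega)]

lemma key : ∀ m : Nat, mdGo (m + 1) (m : Int) = gsum (Nat.toDigits 10 m) := by
  intro m
  induction m using Nat.strong_induction_on with
  | _ m ih =>
    by_cases h : m < 10
    · have h0 : m / 10 = 0 := Nat.div_eq_of_lt h
      rw [toDigits_single m h, mdGo_succ, floordiv_cast, h0]
      simp [gsum]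
    · have h0 : m / 10 ≠ 0 := by
        have : 1 ≤ m / 10 := (Nat.one_le_div_iff (by omega)).mpr (by omega)
        omega
      have hdiv : m / 10 < m := Nat.div_lt_self (by omega) (by omega)
      have h0' : ((m / 10 : Nat) : Int) ≠ 0 := by exact_mod_cast h0
      rw [toDigits_split m (by omega)]
      obtain ⟨a, t, hat⟩ : ∃ a t, Nat.toDigits 10 (m / 10) = a :: t := by
        cases hh : Nat.toDigits 10 (m / 10) with
        | nil => exact absurd hh (toDigits_ne_nil _)
        | cons a t => exact ⟨a, t, rfl⟩
      rw [hat, gsum_snoc]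
      have hlast : t.getLastD a = Nat.digitChar (m / 10 % 10) := by
        have := lastd_toDigits (m / 10) a
        rwa [hat, List.getLastD_cons] at this
      rw [mdGo_succ, floordiv_cast, if_neg h0', mod_cast', mod_cast',
        mdGo_fuel m (m / 10 + 1) (m / 10) (by omega) (by omega), ih (m / 10) hdiv, hat, hlast]
      have hd1 : (Nat.digitChar (m % 10)).toNat = m % 10 + 48 :=
        digitChar_toNat _ (Nat.mod_lt _ (by omega))
      have hd2 : (Nat.digitChar (m / 10 % 10)).toNat = m / 10 % 10 + 48 :=
        digitChar_toNat _ (Nat.mod_lt _ (by omega))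
      simp only [pvF, hd1, hd2]
      split_ifs with hc <;> push_cast at * <;> omega

-- ===== VERDICT (by name: the statement is the Claim_ definition above) =====
theorem missing_digits_spec : Claim_equal_missing_digits := by
  intro n _ hpre
  unfold Spec_missing_digits
  have hn : ((n.toNat : Nat) : Int) = n := Int.toNat_of_nonneg hpre
  rw [alt_eq_gsum]
  have htc : PySem.Int.toChars n = Nat.toDigits 10 n.toNat := by
    simp [PySem.Int.toChars, not_lt.mpr hpre]
  rw [htc]
  calc missing_digits n = mdGo (n.toNat + 1) ((n.toNat : Nat) : Int) := by rw [hn]; rfl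
    _ = gsum (Nat.toDigits 10 n.toNat) := key n.toNat
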